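-- pv_equiv track=rewrite | github.com/ahmad-habaybeh/code-challenge | partition_sort/sort.py | create_partition
-- ===== SOURCE A (Python) =====
-- def create_partition (lst):
--     nm = []
--     cr = []
--     ttl = []
--     cnt = 0
--     for i in lst:
--         if (i.isnumeric()):
--             # check if the character list is not empty and add it to final array.
--             if (len(cr) > 0):
--                 ttl.append(cr)
--                 cr=[]
--             nm.append(i)
--         else:
--             if (len(nm) > 0):
--              # check if the numeric list is not empty and add it to final array.
--                 ttl.append(nm)
--                 nm = []
--             cr.append(i)
--         cnt= cnt + 1
--         # to add the last array to the final array.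
--         if ( cnt == len(lst)):
--             if(len(nm) > 0):
--                 ttl.append(nm)
--             if (len(cr) > 0):
--                 ttl.append(cr)
--     return ttl
-- ===== SOURCE B (Python) =====
-- def create_partition(lst):
--     # Peel off one maximal run of equal-isnumeric()-key elements per outer step.
--     result = []
--     rest = lst
--     while rest:
--         head, tail = rest[0], rest[1:]
--         k = head.isnumeric()
--         j = 0
--         while j < len(tail) and tail[j].isnumeric() == k:
--             j += 1
--         result.append([head] + tail[:j])   # tail[:j] = takeWhile(key == k, tail)
--         rest = tail[j:]                    # tail[j:] = dropWhile(key == k, tail)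
--     return result
-- ===== Notes on version B (the rewrite author's own statement) =====
-- stated objective: simpler
-- what changed: Replaces A's two-buffer (numeric/non-numeric) state machine with counter-triggered end-of-list flush by a run-peeling loop: repeatedly take the maximal prefix of equal isnumeric() key as one group and continue on the remainder.
import Mathlib
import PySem

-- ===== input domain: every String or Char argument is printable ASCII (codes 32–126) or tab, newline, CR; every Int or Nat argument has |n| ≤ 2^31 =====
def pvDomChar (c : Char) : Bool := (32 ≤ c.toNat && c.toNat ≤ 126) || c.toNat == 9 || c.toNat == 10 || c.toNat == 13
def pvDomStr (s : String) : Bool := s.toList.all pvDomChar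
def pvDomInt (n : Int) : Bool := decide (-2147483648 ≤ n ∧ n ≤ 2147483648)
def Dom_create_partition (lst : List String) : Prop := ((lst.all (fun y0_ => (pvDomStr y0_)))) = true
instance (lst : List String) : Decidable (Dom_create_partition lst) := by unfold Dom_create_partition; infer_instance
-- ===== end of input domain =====

-- B is a run-peeling re-implementation of A's buffer state machine; objective: simpler.
-- (On the ASCII domain, Python's str.isnumeric agrees with str.isdigit, ported as PySem.Str.strIsdigit.)

-- ===== PORT A =====
-- A's for-loop with counter cnt: 'cnt == len(lst)' holds exactly when the element
-- being processed is the last one, ported as 'rest.isEmpty' on the remaining suffix.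
def create_partition_goA (nm cr : List String) (ttl : List (List String)) :
    List String → List (List String)
  | [] => ttl
  | i :: rest =>
    let st :=
      if PySem.Str.strIsdigit i then
        -- flush cr if nonempty, then append i to nm
        let p := if cr.length > 0 then (ttl ++ [cr], ([] : List String)) else (ttl, cr)
        (nm ++ [i], p.2, p.1)
      else
        -- flush nm if nonempty, then append i to cr
        let p := if nm.length > 0 then (ttl ++ [nm], ([] : List String)) else (ttl, nm)
        (p.2, cr ++ [i], p.1)
    if rest.isEmpty then
      -- final flush (cnt == len(lst))
      let t1 := if st.1.length > 0 then st.2.2 ++ [st.1] else st.2.2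
      if st.2.1.length > 0 then t1 ++ [st.2.1] else t1
    else create_partition_goA st.1 st.2.1 st.2.2 rest

def create_partition (lst : List String) : List (List String) :=
  create_partition_goA [] [] [] lst

-- ===== PORT B =====
-- Source B's inner while computes j = length of the maximal prefix of tail whose
-- isnumeric() equals k; tail[:j] / tail[j:] are exactly takeWhile / dropWhile.
def create_partition_alt : List String → List (List String)
  | [] => []
  | x :: xs =>
    let k := PySem.Str.strIsdigit x
    (x :: xs.takeWhile (fun y => PySem.Str.strIsdigit y == k)) ::
      create_partition_alt (xs.dropWhile (fun y => PySem.Str.strIsdigit y == k))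
termination_by l => l.length
decreasing_by
  simpa using Nat.lt_succ_of_le (List.length_dropWhile_le _ _)

-- ===== PRECONDITION & SPEC =====
def Spec_create_partition (lst : List String) (out : List (List String)) : Prop := out = create_partition_alt lst
instance (lst : List String) (out : List (List String)) : Decidable (Spec_create_partition lst out) := by unfold Spec_create_partition; infer_instance

-- ===== CLAIM (what is proved, stated in full; the proofs are below) =====
def Claim_equal_create_partition : Prop := ∀ (lst : List String), Dom_create_partition lst → Spec_create_partition lst (create_partition lst)

-- ===== LEMMAS AND PROOFS =====

-- Invariant: A's live buffer (nm if k, cr if not) holds the current nonempty run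
-- of key k; the other buffer is empty; ttl holds the groups already emitted.
theorem goA_run (xs : List String) : ∀ (pending : List String) (k : Bool)
    (ttl : List (List String)), xs ≠ [] → pending ≠ [] →
    (∀ y ∈ pending, PySem.Str.strIsdigit y = k) →
    create_partition_goA (if k then pending else []) (if k then [] else pending) ttl xs
      = (ttl ++ [pending ++ xs.takeWhile (fun y => PySem.Str.strIsdigit y == k)])
          ++ create_partition_alt (xs.dropWhile (fun y => PySem.Str.strIsdigit y == k)) := by
  induction xs with
  | nil => intro _ _ _ h; exact absurd rfl h
  | cons i rest ih =>
    intro pending k ttl _ hp hall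
    by_cases hik : PySem.Chars.strIsdigit i.toList = k
    · -- i extends the current run
      rcases Decidable.em (rest = []) with hr | hr
      · subst hr; clear ih
        cases k <;>
          simp [create_partition_goA, create_partition_alt, PySem.Str.strIsdigit,
            List.length_pos_iff, hp, hik]
      · have hrec := ih (pending ++ [i]) k ttl hr (by simp)
          (by intro y hy
              rcases List.mem_append.1 hy with h | h
              · exact hall y h
              · simp at h; subst h; exact hik)
        clear ih
        cases k <;>
          · simp only [PySem.Str.strIsdigit, List.length_pos_iff] at hrec ⊢
            simp_all [create_partition_goA, hik, hp, hr, List.length_pos_iff,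
              List.takeWhile_cons, List.dropWhile_cons, List.append_assoc]
    · -- key changes: A flushes pending, starts a new run [i]
      have hall' : ∀ y ∈ pending, PySem.Chars.strIsdigit y.toList = k := hall
      have hik' : PySem.Chars.strIsdigit i.toList = !k := by
        cases h : PySem.Chars.strIsdigit i.toList <;> simp_all
      rcases Decidable.em (rest = []) with hr | hr
      · subst hr; clear ih hall
        cases k <;>
          · simp only [Bool.not_true, Bool.not_false] at hik'
            simp [create_partition_goA, create_partition_alt, PySem.Str.strIsdigit,
              List.length_pos_iff, hp, hik']
      · have hrec := ih [i] (!k) (ttl ++ [pending]) hr (by simp)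
          (by intro y hy; simp at hy; subst hy; exact hik')
        clear ih hall
        cases k <;>
          · simp only [Bool.not_true, Bool.not_false] at hrec hik'
            simp only [PySem.Str.strIsdigit, List.length_pos_iff] at hrec ⊢
            simp_all [create_partition_goA, create_partition_alt, hik', hp, hr,
              List.length_pos_iff, List.takeWhile_cons, List.dropWhile_cons,
              List.append_assoc]

-- ===== VERDICT (by name: the statement is the Claim_ definition above) =====
theorem create_partition_spec : Claim_equal_create_partition := by
  intro lst _
  unfold Spec_create_partition create_partition
  cases lst with
  | nil => simp [create_partition_goA, create_partition_alt]
  | cons i rest =>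
    rcases Decidable.em (rest = []) with hr | hr
    · subst hr
      by_cases h : PySem.Chars.strIsdigit i.toList = true <;>
        simp_all [create_partition_goA, create_partition_alt, PySem.Str.strIsdigit]
    · have hrec := goA_run rest [i] (PySem.Str.strIsdigit i) [] hr (by simp)
        (by intro y hy; simp at hy; subst hy; rfl)
      by_cases h : PySem.Chars.strIsdigit i.toList = true
      · simp only [PySem.Str.strIsdigit, h, if_true] at hrec
        simp_all [create_partition_goA, create_partition_alt, PySem.Str.strIsdigit, hr]
      · have h' : PySem.Chars.strIsdigit i.toList = false := by
          cases hc : PySem.Chars.strIsdigit i.toList <;> simp_all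
        simp only [PySem.Str.strIsdigit, h', if_false, Bool.false_eq_true] at hrec
        simp_all [create_partition_goA, create_partition_alt, PySem.Str.strIsdigit, hr, h']
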